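-- pv_equiv track=rewrite | github.com/Dubu703/Dubu_AI_Snake | path_planning.py | find_longest_path_bfs
-- ===== SOURCE A (Python) =====
-- from typing import List, Tuple, Dict
-- from collections import deque
-- from enum import Enum
--
-- class Direction(Enum):
--     UP = (0, -1)
--     DOWN = (0, 1)
--     LEFT = (-1, 0)
--     RIGHT = (1, 0)
--
-- def find_longest_path_bfs(start: Tuple[int, int], size: int, snake_body: List[Tuple[int, int]], avoid_positions: List[Tuple[int, int]]) -> List[Tuple[int, int]] | None:
--     """
--     Finds the longest safe path from start to a position that is not in avoid_positions,
--     avoiding snake_body as obstacles. This is useful for tail chasing or avoiding immediate death.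
--     Returns the path. If no long path, returns None or shortest safe path.
--     This is a simplification of a true longest path, focusing on just finding any safe path first.
--     For true longest path, one might explore all safe paths and pick the longest.
--     A more practical approach for snake AI is to find *any* safe path, and if it leads to tail, even better.
--     """
--
--     q = deque([(start, [])]) # (current_pos, path_so_far)
--     visited = {start}
--
--     obstacles = set(snake_body + avoid_positions)
--     if start in obstacles:
--         obstacles.remove(start) # Head is not an obstacle for itself
--
--     longest_path = []
--
--     while q:
--         current_pos, path_so_far = q.popleft()
--
--         if len(path_so_far) > len(longest_path):
--             longest_path = path_so_far
--
--         for dx, dy in [d.value for d in Direction]: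
--             neighbor_x, neighbor_y = current_pos[0] + dx, current_pos[1] + dy
--             neighbor_pos = (neighbor_x, neighbor_y)
--
--             if not (0 <= neighbor_x < size and 0 <= neighbor_y < size):
--                 continue
--             if neighbor_pos in obstacles:
--                 continue
--             if neighbor_pos in visited:
--                 continue
--
--             visited.add(neighbor_pos)
--             q.append((neighbor_pos, path_so_far + [current_pos])) # Add current_pos to path
--
--     # If start is already an obstacle, then the path cannot even start
--     if start in set(snake_body + avoid_positions):
--         return None
--
--     # After BFS, longest_path contains the longest path found that was valid
--     # But this simple BFS doesn't guarantee a path to a specific target,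
--     # just finds reachable cells.
--     # For tail chase, we need a path *to* the tail.
--     # The `has_path_to_target_bfs` is more appropriate.
--
--     # Re-evaluating: The "Tail Chase strategy" is better implemented using A* to the tail.
--     # We need to find a path to the tail (if food is unreachable or dangerous) and ensure it's safe.
--     # "安全 루프 생성" implies not getting trapped.
--
--     # A simple Tail Chase using A* will be:
--     # 1. Find path to food.
--     # 2. If no path to food, or food path is risky, find path to tail.
--     #    When pathfinding to tail, consider the *future* position of the tail (which is one step behind current tail).
--     # This function `find_longest_path_bfs` might be useful for exploring general safe areas,
--     # but for a direct "tail chase", A* to tail is more direct.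
--
--     # Let's adjust, and primarily use A* for pathfinding to specific targets.
--     # `find_longest_path_bfs` is removed from here for simplicity and focus.
--     return longest_path if longest_path else None # Return longest path or None
-- ===== SOURCE B (Python) =====
-- def find_longest_path_bfs(start, size, snake_body, avoid_positions):
--     # Level-synchronous BFS with parent pointers: no per-queue-entry path copies;
--     # the longest path is reconstructed once from the parent dict at the end.
--     obstacles = set(snake_body + avoid_positions)
--     blocked = start in obstacles
--     obstacles.discard(start)
--
--     visited = {start}
--     parent = {}
--     level = [start]
--     last, depth = [start], 0
--     while level:
--         nxt = []
--         for pos in level: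
--             x, y = pos[0], pos[1]
--             for dx, dy in ((0, -1), (0, 1), (-1, 0), (1, 0)):
--                 nb = (x + dx, y + dy)
--                 if 0 <= nb[0] < size and 0 <= nb[1] < size and nb not in obstacles and nb not in visited:
--                     visited.add(nb)
--                     parent[nb] = pos
--                     nxt.append(nb)
--         if nxt:
--             depth += 1
--             last = nxt
--         level = nxt
--
--     if blocked or depth == 0:
--         return None
--     rev = []
--     cur = last[0]
--     for _ in range(depth):
--         cur = parent[cur]
--         rev.append(cur)
--     rev.reverse()
--     return rev
-- ===== Notes on version B (the rewrite author's own statement) =====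
-- stated objective: alternative
-- what changed: A's FIFO BFS copies the whole path-so-far into every queue entry; B runs a level-synchronous BFS (expanding whole frontiers, one list per depth) that records only parent pointers, and reconstructs the single longest path from the parent dict once at the end - linear instead of quadratic bookkeeping in the number of reachable cells.
-- outside the precondition, e.g. on find_longest_path_bfs((5,), 2, [], []): A raises IndexError, B raises IndexError
import Mathlib
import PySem

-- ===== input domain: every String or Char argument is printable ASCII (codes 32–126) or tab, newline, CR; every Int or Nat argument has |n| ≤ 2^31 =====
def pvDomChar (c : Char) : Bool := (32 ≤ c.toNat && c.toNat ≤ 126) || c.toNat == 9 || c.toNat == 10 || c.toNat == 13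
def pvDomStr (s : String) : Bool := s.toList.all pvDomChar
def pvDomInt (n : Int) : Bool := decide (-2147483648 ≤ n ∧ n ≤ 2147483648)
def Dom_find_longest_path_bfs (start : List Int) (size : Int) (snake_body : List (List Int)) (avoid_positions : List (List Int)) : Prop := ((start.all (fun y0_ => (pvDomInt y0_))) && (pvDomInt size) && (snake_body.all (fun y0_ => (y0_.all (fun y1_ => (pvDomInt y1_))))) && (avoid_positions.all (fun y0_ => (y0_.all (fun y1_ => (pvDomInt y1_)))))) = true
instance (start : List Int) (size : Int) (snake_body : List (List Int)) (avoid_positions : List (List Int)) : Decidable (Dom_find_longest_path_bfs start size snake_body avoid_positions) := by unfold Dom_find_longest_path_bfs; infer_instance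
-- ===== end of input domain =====

-- B replaces A's per-queue-entry path copies by a level-synchronous BFS with parent pointers,
-- reconstructing the longest path once after the search (objective: alternative).


-- ===== PORT A =====

-- [d.value for d in Direction] = UP, DOWN, LEFT, RIGHT
def pvDirs : List (Int × Int) := [(0, -1), (0, 1), (-1, 0), (1, 0)]

-- body of A's `for dx, dy in …` loop: one neighbour check, state = (queue, visited)
def pvStepA (size : Int) (obstacles : PySem.Set (List Int))
    (pos : List Int) (path : List (List Int)) (x y : Int)
    (st : List (List Int × List (List Int)) × PySem.Set (List Int)) (d : Int × Int) :
    List (List Int × List (List Int)) × PySem.Set (List Int) :=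
  -- nb = (x+dx, y+dy), written inline
  if (decide (0 ≤ x + d.1) && decide (x + d.1 < size) &&
      decide (0 ≤ y + d.2) && decide (y + d.2 < size)) &&
      !(PySem.Set.contains obstacles [x + d.1, y + d.2]) && !(PySem.Set.contains st.2 [x + d.1, y + d.2]) then
    (st.1 ++ [([x + d.1, y + d.2], path ++ [pos])], PySem.Set.add st.2 [x + d.1, y + d.2])
  else st

-- the `while q:` loop of A; queue entries are (current_pos, path_so_far).
-- The Nat fuel only drives termination: each iteration dequeues one entry, and at most
-- 1 + size^2 entries are ever enqueued (each enqueue marks a distinct in-grid cell visited),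
-- so the fuel supplied by the caller (size.toNat * size.toNat + 2) is never exhausted.
def pvLoopA (size : Int) (obstacles : PySem.Set (List Int)) :
    Nat → List (List Int × List (List Int)) → PySem.Set (List Int) → List (List Int) →
    List (List Int)
  | 0, _, _, longest => longest
  | _ + 1, [], _, longest => longest
  | fuel + 1, (pos, path) :: q, visited, longest =>
    let longest' := if path.length > longest.length then path else longest
    -- current_pos[0] / current_pos[1]: exact under Pre_ (start has ≥ 2 coordinates; every
    -- generated neighbour is a pair), so the default is never read.
    let x := PySem.List.pyGetD pos 0 0
    let y := PySem.List.pyGetD pos 1 0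
    let st := pvDirs.foldl (pvStepA size obstacles pos path x y) (q, visited)
    pvLoopA size obstacles fuel st.1 st.2 longest'

def find_longest_path_bfs (start : List Int) (size : Int) (snake_body : List (List Int)) (avoid_positions : List (List Int)) : Option (List (List Int)) :=
  let obstacles0 := PySem.Set.ofList (snake_body ++ avoid_positions)
  -- `if start in obstacles: obstacles.remove(start)` — a guarded remove is Set.discard
  let obstacles := if PySem.Set.contains obstacles0 start then PySem.Set.discard obstacles0 start else obstacles0
  let longest := pvLoopA size obstacles (size.toNat * size.toNat + 2)
      [(start, [])] (PySem.Set.ofList [start]) []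
  if PySem.Set.contains (PySem.Set.ofList (snake_body ++ avoid_positions)) start then none
  else if longest = [] then none else some longest

-- ===== PORT B =====

-- body of B's inner `for dx, dy in …` loop, state = (nxt, visited, parent)
def pvStepB (size : Int) (obstacles : PySem.Set (List Int))
    (pos : List Int) (x y : Int)
    (st : List (List Int) × PySem.Set (List Int) × PySem.Dict (List Int) (List Int))
    (d : Int × Int) :
    List (List Int) × PySem.Set (List Int) × PySem.Dict (List Int) (List Int) :=
  -- nb = (x+dx, y+dy), written inline
  if (decide (0 ≤ x + d.1) && decide (x + d.1 < size) &&
      decide (0 ≤ y + d.2) && decide (y + d.2 < size)) &&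
      !(PySem.Set.contains obstacles [x + d.1, y + d.2]) && !(PySem.Set.contains st.2.1 [x + d.1, y + d.2]) then
    (st.1 ++ [[x + d.1, y + d.2]], PySem.Set.add st.2.1 [x + d.1, y + d.2], st.2.2.insert [x + d.1, y + d.2] pos)
  else st

-- body of B's `for pos in level:` loop (pos[0]/pos[1]: exact under Pre_, as in pvLoopA)
def pvNodeB (size : Int) (obstacles : PySem.Set (List Int))
    (st : List (List Int) × PySem.Set (List Int) × PySem.Dict (List Int) (List Int))
    (pos : List Int) :
    List (List Int) × PySem.Set (List Int) × PySem.Dict (List Int) (List Int) :=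
  let x := PySem.List.pyGetD pos 0 0
  let y := PySem.List.pyGetD pos 1 0
  pvDirs.foldl (pvStepB size obstacles pos x y) st

-- B's `while level:` loop; one fuel unit per level. There are at most 1 + size^2 nonempty
-- levels (each level after the first discovers at least one fresh in-grid cell), so the
-- fuel supplied by the caller (size.toNat * size.toNat + 2) is never exhausted.
def pvLoopB (size : Int) (obstacles : PySem.Set (List Int)) :
    Nat → List (List Int) → PySem.Set (List Int) →
    PySem.Dict (List Int) (List Int) → List (List Int) → Int →
    PySem.Dict (List Int) (List Int) × List (List Int) × Int
  | 0, _, _, par, last, depth => (par, last, depth)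
  | _ + 1, [], _, par, last, depth => (par, last, depth)
  | fuel + 1, p :: lvl, vis, par, last, depth =>
    let st := (p :: lvl).foldl (pvNodeB size obstacles) ([], vis, par)
    let best := if st.1.isEmpty then (last, depth) else (st.1, depth + 1)
    pvLoopB size obstacles fuel st.1 st.2.1 st.2.2 best.1 best.2

-- `for _ in range(depth): cur = parent[cur]; rev.append(cur)` — parent[cur] is ported as
-- getD with default [], which is never read (the parent chain of a node at depth d has
-- exactly d links).
def pvRecLoopB (par : PySem.Dict (List Int) (List Int)) :
    Nat → List Int → List (List Int) → List (List Int)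
  | 0, _, rev => rev
  | n + 1, cur, rev =>
    let p := par.getD cur []
    pvRecLoopB par n p (rev ++ [p])

def find_longest_path_bfs_alt (start : List Int) (size : Int) (snake_body : List (List Int)) (avoid_positions : List (List Int)) : Option (List (List Int)) :=
  let obstacles0 := PySem.Set.ofList (snake_body ++ avoid_positions)
  let blocked := PySem.Set.contains obstacles0 start
  let obstacles := PySem.Set.discard obstacles0 start
  let r := pvLoopB size obstacles (size.toNat * size.toNat + 2)
      [start] (PySem.Set.ofList [start]) PySem.Dict.empty [start] 0
  if blocked || r.2.2 == 0 then none
  else some ((pvRecLoopB r.1 r.2.2.toNat (PySem.List.pyGetD r.2.1 0 []) []).reverse)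

-- ===== PRECONDITION & SPEC =====
-- Pre_ excludes only the inputs where A raises: a start tuple with fewer than 2 coordinates
-- makes A's `current_pos[0]`/`current_pos[1]` raise IndexError (B raises there too).
def Pre_find_longest_path_bfs (start : List Int) (size : Int) (snake_body : List (List Int)) (avoid_positions : List (List Int)) : Prop := 2 ≤ start.length
instance (start : List Int) (size : Int) (snake_body : List (List Int)) (avoid_positions : List (List Int)) : Decidable (Pre_find_longest_path_bfs start size snake_body avoid_positions) := by unfold Pre_find_longest_path_bfs; infer_instance
def pvWitness_find_longest_path_bfs : List Int × Int × List (List Int) × List (List Int) := ([0, 0], 2, [[1, 1]], [])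

def Spec_find_longest_path_bfs (start : List Int) (size : Int) (snake_body : List (List Int)) (avoid_positions : List (List Int)) (out : Option (List (List Int))) : Prop := out = find_longest_path_bfs_alt start size snake_body avoid_positions
instance (start : List Int) (size : Int) (snake_body : List (List Int)) (avoid_positions : List (List Int)) (out : Option (List (List Int))) : Decidable (Spec_find_longest_path_bfs start size snake_body avoid_positions out) := by unfold Spec_find_longest_path_bfs; infer_instance

-- ===== CLAIM (what is proved, stated in full; the proofs are below) =====
def Claim_equal_find_longest_path_bfs : Prop := ∀ (start : List Int) (size : Int) (snake_body : List (List Int)) (avoid_positions : List (List Int)), Dom_find_longest_path_bfs start size snake_body avoid_positions → Pre_find_longest_path_bfs start size snake_body avoid_positions → Spec_find_longest_path_bfs start size snake_body avoid_positions (find_longest_path_bfs start size snake_body avoid_positions)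

-- ===== LEMMAS AND PROOFS =====

-- abstract reconstruction: recPath par n cur = the (already reversed) chain pvRecLoopB builds
def recPath (par : PySem.Dict (List Int) (List Int)) : Nat → List Int → List (List Int)
  | 0, _ => []
  | n + 1, cur => recPath par n (par.getD cur []) ++ [par.getD cur []]

theorem recLoopB_eq_recPath (par : PySem.Dict (List Int) (List Int)) :
    ∀ (n : Nat) (cur : List Int) (rev : List (List Int)),
    (pvRecLoopB par n cur rev).reverse = recPath par n cur ++ rev.reverse := by
  intro n
  induction n with
  | zero => intro cur rev; simp [pvRecLoopB, recPath]
  | succ n ih =>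
    intro cur rev
    simp [pvRecLoopB, recPath, ih]

theorem discard_of_not_mem {s : PySem.Set (List Int)} {x : List Int} (h : x ∉ s) :
    PySem.Set.discard s x = s := by
  simp only [PySem.Set.discard]
  apply List.filter_eq_self.mpr
  intro a ha
  simp_all
  rintro rfl; exact h ha

-- inserting a key not on the chain leaves recPath unchanged
theorem recPath_insert (par : PySem.Dict (List Int) (List Int)) (nb v : List Int) :
    ∀ (n : Nat) (cur : List Int), cur ≠ nb →
    (∀ z ∈ recPath par n cur, z ≠ nb) →
    recPath (par.insert nb v) n cur = recPath par n cur := by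
  intro n
  induction n with
  | zero => intro cur _ _; rfl
  | succ n ih =>
    intro cur hcur hchain
    have hget : (par.insert nb v).getD cur [] = par.getD cur [] :=
      PySem.Dict.getD_insert_of_ne par v [] hcur
    have hp : par.getD cur [] ∈ recPath par (n + 1) cur := by
      simp [recPath]
    have hpne : par.getD cur [] ≠ nb := hchain _ hp
    have hsub : ∀ z ∈ recPath par n (par.getD cur []), z ≠ nb := by
      intro z hz
      exact hchain z (by simp [recPath]; exact Or.inl hz)
    simp only [recPath, hget]
    rw [ih _ hpne hsub]

-- the grid of a size×size board, as [x, y] lists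
def pvCells (size : Int) : List (List Int) :=
  (List.range size.toNat).flatMap (fun i => (List.range size.toNat).map (fun j => [(i : Int), (j : Int)]))

-- number of grid cells not yet visited
def gridUnvis (size : Int) (vis : PySem.Set (List Int)) : Nat :=
  ((pvCells size).filter (fun c => !(PySem.Set.contains vis c))).length

theorem cells_mem (size a b : Int) (ha0 : 0 ≤ a) (ha : a < size) (hb0 : 0 ≤ b) (hb : b < size) :
    [a, b] ∈ pvCells size := by
  simp only [pvCells, List.mem_flatMap, List.mem_map]
  refine ⟨a, ?_, b, ?_, rfl⟩
  · simp
    exact ⟨a.toNat, by omega, by omega⟩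
  · simp
    exact ⟨b.toNat, by omega, by omega⟩

theorem filter_length_mono {α : Type} (p q : α → Bool) :
    ∀ (l : List α), (∀ x ∈ l, q x = true → p x = true) →
    (l.filter q).length ≤ (l.filter p).length := by
  intro l
  induction l with
  | nil => intro _; simp
  | cons a l ih =>
    intro h
    have ih' := ih (fun x hx => h x (List.mem_cons_of_mem _ hx))
    by_cases hq : q a = true
    · rw [List.filter_cons_of_pos hq, List.filter_cons_of_pos (h a List.mem_cons_self hq)]
      simpa using ih'
    · rw [List.filter_cons_of_neg (by simpa using hq)]
      by_cases hp : p a = true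
      · rw [List.filter_cons_of_pos hp]; simp; omega
      · rw [List.filter_cons_of_neg (by simpa using hp)]; exact ih'

theorem filter_length_lt {α : Type} (p q : α → Bool) :
    ∀ (l : List α), (∀ x ∈ l, q x = true → p x = true) →
    ∀ c ∈ l, p c = true → q c = false →
    (l.filter q).length + 1 ≤ (l.filter p).length := by
  intro l
  induction l with
  | nil => intro _ c hc; simp at hc
  | cons a l ih =>
    intro h c hc hp hq
    rcases List.mem_cons.mp hc with rfl | hc
    · rw [List.filter_cons_of_pos hp, List.filter_cons_of_neg (by simp [hq])]
      have := filter_length_mono p q l (fun x hx => h x (List.mem_cons_of_mem _ hx))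
      simp; omega
    · have ih' := ih (fun x hx => h x (List.mem_cons_of_mem _ hx)) c hc hp hq
      by_cases hqa : q a = true
      · rw [List.filter_cons_of_pos hqa, List.filter_cons_of_pos (h a List.mem_cons_self hqa)]
        simpa using ih'
      · rw [List.filter_cons_of_neg (by simpa using hqa)]
        by_cases hpa : p a = true
        · rw [List.filter_cons_of_pos hpa]; simp; omega
        · rw [List.filter_cons_of_neg (by simpa using hpa)]; exact ih'

-- adding a fresh in-grid cell strictly decreases the unvisited count
theorem gridUnvis_add (size : Int) (vis : PySem.Set (List Int)) (c : List Int)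
    (hc : c ∈ pvCells size) (hv : c ∉ vis) :
    gridUnvis size (PySem.Set.add vis c) + 1 ≤ gridUnvis size vis := by
  have hmono : ∀ x ∈ pvCells size,
      (!(PySem.Set.contains (PySem.Set.add vis c) x)) = true → (!(PySem.Set.contains vis x)) = true := by
    intro x _ hx
    by_cases h : PySem.Set.contains vis x = true
    · exfalso
      have hm : x ∈ PySem.Set.add vis c :=
        (PySem.Set.mem_add vis c x).mpr (Or.inl ((PySem.Set.contains_iff _ _).mp h))
      rw [(PySem.Set.contains_iff _ _).mpr hm] at hx
      simp at hx
    · rw [Bool.not_eq_true] at h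
      rw [h]
      rfl
  have hp : (!(PySem.Set.contains vis c)) = true := by
    simp only [Bool.not_eq_true']
    by_cases h : PySem.Set.contains vis c = true
    · exact absurd ((PySem.Set.contains_iff _ _).mp h) hv
    · simpa using h
  have hq : (!(PySem.Set.contains (PySem.Set.add vis c) c)) = false := by
    have hm : c ∈ PySem.Set.add vis c := (PySem.Set.mem_add vis c c).mpr (Or.inr rfl)
    rw [(PySem.Set.contains_iff _ _).mpr hm]
    rfl
  exact filter_length_lt _ _ _ hmono c hc hp hq

theorem len_flatMap_const {α β : Type} (k : Nat) :
    ∀ (l : List α) (f : α → List β), (∀ x ∈ l, (f x).length = k) →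
    (l.flatMap f).length = l.length * k := by
  intro l
  induction l with
  | nil => intro f _; simp
  | cons a l ih =>
    intro f h
    simp only [List.flatMap_cons, List.length_append, List.length_cons,
      h a List.mem_cons_self, ih f (fun x hx => h x (List.mem_cons_of_mem _ hx))]
    ring

theorem gridUnvis_le (size : Int) (vis : PySem.Set (List Int)) :
    gridUnvis size vis ≤ size.toNat * size.toNat := by
  have h1 : (pvCells size).length = size.toNat * size.toNat := by
    have := len_flatMap_const (β := List Int) size.toNat (List.range size.toNat)
      (fun i => (List.range size.toNat).map (fun j => [(i : Int), (j : Int)]))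
      (fun x _ => by simp)
    simpa [pvCells] using this
  calc gridUnvis size vis ≤ (pvCells size).length := List.length_filter_le _ _
    _ = _ := h1

-- a queue entry (pos, path) of A, coupled to B's visited set and parent dict
def GoodA (vis : PySem.Set (List Int)) (par : PySem.Dict (List Int) (List Int))
    (e : List Int × List (List Int)) : Prop :=
  recPath par e.2.length e.1 = e.2 ∧ e.1 ∈ vis ∧ ∀ z ∈ e.2, z ∈ vis

-- A's dir-fold only appends to the queue; the appended part does not depend on the queue
theorem foldA_shift (size : Int) (obstacles : PySem.Set (List Int))
    (pos : List Int) (path : List (List Int)) (x y : Int) :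
    ∀ (dirs : List (Int × Int)) (q q' : List (List Int × List (List Int)))
      (vis : PySem.Set (List Int)),
    List.foldl (pvStepA size obstacles pos path x y) (q ++ q', vis) dirs
      = (q ++ (List.foldl (pvStepA size obstacles pos path x y) (q', vis) dirs).1,
         (List.foldl (pvStepA size obstacles pos path x y) (q', vis) dirs).2) := by
  intro dirs
  induction dirs with
  | nil => intro q q' vis; simp
  | cons d rest ih =>
    intro q q' vis
    simp only [List.foldl_cons]
    by_cases hc : ((decide (0 ≤ x + d.1) && decide (x + d.1 < size) &&
        decide (0 ≤ y + d.2) && decide (y + d.2 < size)) &&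
        !(PySem.Set.contains obstacles [x + d.1, y + d.2]) &&
        !(PySem.Set.contains vis [x + d.1, y + d.2])) = true
    · have h1 : pvStepA size obstacles pos path x y (q ++ q', vis) d
          = (q ++ (q' ++ [([x + d.1, y + d.2], path ++ [pos])]), PySem.Set.add vis [x + d.1, y + d.2]) := by
        simp only [pvStepA]; rw [if_pos hc]; simp
      have h2 : pvStepA size obstacles pos path x y (q', vis) d
          = (q' ++ [([x + d.1, y + d.2], path ++ [pos])], PySem.Set.add vis [x + d.1, y + d.2]) := by
        simp only [pvStepA]; rw [if_pos hc]
      rw [h1, h2, ih]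
    · have h1 : pvStepA size obstacles pos path x y (q ++ q', vis) d = (q ++ q', vis) := by
        simp only [pvStepA]; rw [if_neg hc]
      have h2 : pvStepA size obstacles pos path x y (q', vis) d = (q', vis) := by
        simp only [pvStepA]; rw [if_neg hc]
      rw [h1, h2, ih]

-- coupling of one node's 4-direction folds in A and B
theorem fold_couple (size : Int) (obstacles : PySem.Set (List Int))
    (pos : List Int) (path : List (List Int)) (x y : Int) :
    ∀ (dirs : List (Int × Int)) (qA : List (List Int × List (List Int)))
      (vis : PySem.Set (List Int)) (par : PySem.Dict (List Int) (List Int)),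
    (∀ e ∈ qA, GoodA vis par e) →
    pos ∈ vis → (∀ z ∈ path, z ∈ vis) →
    recPath par path.length pos = path →
    (List.foldl (pvStepB size obstacles pos x y) (qA.map Prod.fst, vis, par) dirs).1
        = (List.foldl (pvStepA size obstacles pos path x y) (qA, vis) dirs).1.map Prod.fst
    ∧ (List.foldl (pvStepB size obstacles pos x y) (qA.map Prod.fst, vis, par) dirs).2.1
        = (List.foldl (pvStepA size obstacles pos path x y) (qA, vis) dirs).2
    ∧ (∀ e ∈ (List.foldl (pvStepA size obstacles pos path x y) (qA, vis) dirs).1,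
        GoodA (List.foldl (pvStepA size obstacles pos path x y) (qA, vis) dirs).2
              (List.foldl (pvStepB size obstacles pos x y) (qA.map Prod.fst, vis, par) dirs).2.2 e)
    ∧ (∀ e ∈ (List.foldl (pvStepA size obstacles pos path x y) (qA, vis) dirs).1,
        e ∈ qA ∨ e.2 = path ++ [pos])
    ∧ (∀ z ∈ vis, z ∈ (List.foldl (pvStepA size obstacles pos path x y) (qA, vis) dirs).2)
    ∧ (∀ (n : Nat) (cur : List Int), cur ∈ vis → (∀ z ∈ recPath par n cur, z ∈ vis) →
        recPath (List.foldl (pvStepB size obstacles pos x y) (qA.map Prod.fst, vis, par) dirs).2.2 n cur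
          = recPath par n cur)
    ∧ (List.foldl (pvStepA size obstacles pos path x y) (qA, vis) dirs).1.length
        + gridUnvis size (List.foldl (pvStepA size obstacles pos path x y) (qA, vis) dirs).2
        ≤ qA.length + gridUnvis size vis := by
  intro dirs
  induction dirs with
  | nil =>
    intro qA vis par hq hpos hpath hrec
    exact ⟨rfl, rfl, hq, fun e _ => Or.inl ‹_›, fun z hz => hz, fun n cur _ _ => rfl, le_refl _⟩
  | cons d rest ih =>
    intro qA vis par hq hpos hpath hrec
    simp only [List.foldl_cons]
    by_cases hc : ((decide (0 ≤ x + d.1) && decide (x + d.1 < size) &&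
        decide (0 ≤ y + d.2) && decide (y + d.2 < size)) &&
        !(PySem.Set.contains obstacles [x + d.1, y + d.2]) &&
        !(PySem.Set.contains vis [x + d.1, y + d.2])) = true
    · have hnb : [x + d.1, y + d.2] ∉ vis := by
        intro hmem
        rw [(PySem.Set.contains_iff vis _).mpr hmem] at hc
        simp at hc
      have hgrid : [x + d.1, y + d.2] ∈ pvCells size := by
        apply cells_mem <;> { simp only [Bool.and_eq_true, decide_eq_true_eq] at hc; tauto }
      have hstepA : pvStepA size obstacles pos path x y (qA, vis) d
          = (qA ++ [([x + d.1, y + d.2], path ++ [pos])],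
             PySem.Set.add vis [x + d.1, y + d.2]) := by
        simp only [pvStepA]; rw [if_pos hc]
      have hstepB : pvStepB size obstacles pos x y (qA.map Prod.fst, vis, par) d
          = (qA.map Prod.fst ++ [[x + d.1, y + d.2]],
             PySem.Set.add vis [x + d.1, y + d.2],
             par.insert [x + d.1, y + d.2] pos) := by
        simp only [pvStepB]; rw [if_pos hc]
      rw [hstepA, hstepB]
      have hmapq : (qA ++ [([x + d.1, y + d.2], path ++ [pos])]).map Prod.fst
          = qA.map Prod.fst ++ [[x + d.1, y + d.2]] := by
        simp
      rw [← hmapq]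
      have hins : ∀ (n : Nat) (cur : List Int), cur ∈ vis →
          (∀ z ∈ recPath par n cur, z ∈ vis) →
          recPath (par.insert [x + d.1, y + d.2] pos) n cur = recPath par n cur := by
        intro n cur hcur hchain
        exact recPath_insert par _ pos n cur (fun h => hnb (h ▸ hcur))
          (fun z hz h => hnb (h ▸ hchain z hz))
      have hrec' : recPath (par.insert [x + d.1, y + d.2] pos) path.length pos = path := by
        rw [hins path.length pos hpos (fun z hz => hpath z (hrec ▸ hz))]
        exact hrec
      have hq' : ∀ e ∈ qA ++ [([x + d.1, y + d.2], path ++ [pos])],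
          GoodA (PySem.Set.add vis [x + d.1, y + d.2]) (par.insert [x + d.1, y + d.2] pos) e := by
        intro e he
        rcases List.mem_append.mp he with he | he
        · obtain ⟨h1, h2, h3⟩ := hq e he
          refine ⟨?_, (PySem.Set.mem_add vis _ _).mpr (Or.inl h2),
            fun z hz => (PySem.Set.mem_add vis _ _).mpr (Or.inl (h3 z hz))⟩
          rw [hins e.2.length e.1 h2 (fun z hz => h3 z (h1 ▸ hz))]
          exact h1
        · have he' : e = ([x + d.1, y + d.2], path ++ [pos]) := by simpa using he
          subst he'
          refine ⟨?_, (PySem.Set.mem_add vis _ _).mpr (Or.inr rfl), ?_⟩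
          · show recPath _ (path ++ [pos]).length [x + d.1, y + d.2] = path ++ [pos]
            have hlen : (path ++ [pos]).length = path.length + 1 := by simp
            rw [hlen]
            show recPath _ path.length ((par.insert [x + d.1, y + d.2] pos).getD [x + d.1, y + d.2] [])
                ++ [(par.insert [x + d.1, y + d.2] pos).getD [x + d.1, y + d.2] []] = _
            rw [PySem.Dict.getD_insert_self, hrec']
          · intro z hz
            rcases List.mem_append.mp hz with hz | hz
            · exact (PySem.Set.mem_add vis _ _).mpr (Or.inl (hpath z hz))
            · have hzp : z = pos := by simpa using hz
              exact (PySem.Set.mem_add vis _ _).mpr (Or.inl (hzp ▸ hpos))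
      obtain ⟨c1, c2, c3, c4, c5, c6, c7⟩ := ih (qA ++ [([x + d.1, y + d.2], path ++ [pos])])
        (PySem.Set.add vis [x + d.1, y + d.2]) (par.insert [x + d.1, y + d.2] pos)
        hq' ((PySem.Set.mem_add vis _ _).mpr (Or.inl hpos))
        (fun z hz => (PySem.Set.mem_add vis _ _).mpr (Or.inl (hpath z hz))) hrec'
      refine ⟨c1, c2, c3, ?_, ?_, ?_, ?_⟩
      · intro e he
        rcases c4 e he with he' | he'
        · rcases List.mem_append.mp he' with h | h
          · exact Or.inl h
          · exact Or.inr (by simpa using congrArg Prod.snd (by simpa using h : e = _))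
        · exact Or.inr he'
      · intro z hz
        exact c5 z ((PySem.Set.mem_add vis _ _).mpr (Or.inl hz))
      · intro n cur hcur hchain
        have h1 := hins n cur hcur hchain
        have h2 := c6 n cur ((PySem.Set.mem_add vis _ _).mpr (Or.inl hcur))
          (fun z hz => (PySem.Set.mem_add vis _ _).mpr (Or.inl (hchain z (h1 ▸ hz))))
        rw [h2, h1]
      · have hdec := gridUnvis_add size vis [x + d.1, y + d.2] hgrid hnb
        have : (qA ++ [([x + d.1, y + d.2], path ++ [pos])]).length
            + gridUnvis size (PySem.Set.add vis [x + d.1, y + d.2])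
            ≤ qA.length + gridUnvis size vis := by
          simp only [List.length_append, List.length_cons, List.length_nil]
          omega
        omega
    · have hstepA : pvStepA size obstacles pos path x y (qA, vis) d = (qA, vis) := by
        simp only [pvStepA]; rw [if_neg hc]
      have hstepB : pvStepB size obstacles pos x y (qA.map Prod.fst, vis, par) d
          = (qA.map Prod.fst, vis, par) := by
        simp only [pvStepB]; rw [if_neg hc]
      rw [hstepA, hstepB]
      exact ih qA vis par hq hpos hpath hrec

-- coupling one whole level: A's fuelled queue loop processes the level's entries one by one
-- (without changing `longest`, since every path in the level is no longer than L), while B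
-- folds `pvNodeB` over the level's positions.
theorem level_couple (size : Int) (obstacles : PySem.Set (List Int)) (dep : Nat) :
    ∀ (lvl accA : List (List Int × List (List Int)))
      (vis : PySem.Set (List Int)) (par : PySem.Dict (List Int) (List Int))
      (L : List (List Int)) (f : Nat),
    (∀ e ∈ lvl ++ accA, GoodA vis par e) →
    (∀ e ∈ lvl, e.2.length = dep) →
    (∀ e ∈ accA, e.2.length = dep + 1) →
    dep ≤ L.length →
    ∃ qA' vis' par',
      pvLoopA size obstacles (lvl.length + f) (lvl ++ accA) vis L
        = pvLoopA size obstacles f qA' vis' L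
      ∧ (lvl.map Prod.fst).foldl (pvNodeB size obstacles) (accA.map Prod.fst, vis, par)
          = (qA'.map Prod.fst, vis', par')
      ∧ (∀ e ∈ qA', GoodA vis' par' e)
      ∧ (∀ e ∈ qA', e.2.length = dep + 1)
      ∧ (∀ z ∈ vis, z ∈ vis')
      ∧ (∀ (n : Nat) (cur : List Int), cur ∈ vis → (∀ z ∈ recPath par n cur, z ∈ vis) →
          recPath par' n cur = recPath par n cur)
      ∧ qA'.length + gridUnvis size vis' ≤ accA.length + gridUnvis size vis := by
  intro lvl
  induction lvl with
  | nil =>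
    intro accA vis par L f hg _ hacc _
    exact ⟨accA, vis, par, by simp, rfl, fun e he => hg e (by simpa using he), hacc,
      fun z hz => hz, fun n cur _ _ => rfl, le_refl _⟩
  | cons e lvl ih =>
    intro accA vis par L f hg hlvl hacc hL
    obtain ⟨hrecE, hposE, hpathE⟩ := hg e (List.mem_cons_self)
    -- one pvLoopA step on the head entry
    have hlen : (e :: lvl).length + f = (lvl.length + f) + 1 := by simp; omega
    rw [hlen]
    obtain ⟨pos, path⟩ := e
    simp only [List.cons_append, pvLoopA]
    have hnoup : (if path.length > L.length then path else L) = L := by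
      have := hlvl (pos, path) List.mem_cons_self
      simp only at this
      rw [if_neg (by omega)]
    rw [hnoup]
    -- split A's fold: queue = lvl ++ accA, only accA-side extension matters
    have hshift := foldA_shift size obstacles pos path
      (PySem.List.pyGetD pos 0 0) (PySem.List.pyGetD pos 1 0) pvDirs lvl accA vis
    obtain ⟨c1, c2, c3, c4, c5, c6, c7⟩ := fold_couple size obstacles pos path
      (PySem.List.pyGetD pos 0 0) (PySem.List.pyGetD pos 1 0) pvDirs accA vis par
      (fun e' he' => hg e' (List.mem_cons_of_mem _ (List.mem_append_right _ he'))) hposE hpathE hrecE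
    set FA := List.foldl (pvStepA size obstacles pos path
      (PySem.List.pyGetD pos 0 0) (PySem.List.pyGetD pos 1 0)) (accA, vis) pvDirs with hFA
    set FB := List.foldl (pvStepB size obstacles pos
      (PySem.List.pyGetD pos 0 0) (PySem.List.pyGetD pos 1 0)) (accA.map Prod.fst, vis, par) pvDirs with hFB
    -- apply IH to the rest of the level with the extended accumulator
    have hglvl : ∀ e' ∈ lvl ++ FA.1, GoodA FA.2 FB.2.2 e' := by
      intro e' he'
      rcases List.mem_append.mp he' with h | h
      · obtain ⟨h1, h2, h3⟩ := hg e' (List.mem_cons_of_mem _ (List.mem_append_left _ h))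
        exact ⟨by rw [c6 e'.2.length e'.1 h2 (fun z hz => h3 z (h1 ▸ hz))]; exact h1,
          c5 e'.1 h2, fun z hz => c5 z (h3 z hz)⟩
      · exact c3 e' h
    have hlenFA : ∀ e' ∈ FA.1, e'.2.length = dep + 1 := by
      intro e' he'
      rcases c4 e' he' with h | h
      · exact hacc e' h
      · rw [h]; simp [hlvl (pos, path) List.mem_cons_self]
    obtain ⟨qA', vis', par', d1, d2, d3, d4, d5, d6, d7⟩ :=
      ih FA.1 FA.2 FB.2.2 L f hglvl (fun e' he' => hlvl e' (List.mem_cons_of_mem _ he'))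
        hlenFA hL
    refine ⟨qA', vis', par', ?_, ?_, d3, d4,
      fun z hz => d5 z (c5 z hz), ?_, ?_⟩
    · -- A-side equation
      rw [hshift]
      simpa using d1
    · -- B-side fold equation
      have : pvNodeB size obstacles (accA.map Prod.fst, vis, par) pos = (FA.1.map Prod.fst, FA.2, FB.2.2) := by
        simp only [pvNodeB]
        rw [← hFB]
        exact Prod.ext c1 (Prod.ext c2 rfl)
      simpa [this] using d2
    · -- recPath stability composes
      intro n cur hcur hchain
      have h1 := c6 n cur hcur hchain
      have h2 := d6 n cur (c5 cur hcur) (fun z hz => c5 z (hchain z (h1 ▸ hz)))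
      rw [h2, h1]
    · -- counting composes
      exact le_trans d7 c7

theorem pvLoopA_nil (size : Int) (obstacles : PySem.Set (List Int)) :
    ∀ (f : Nat) (vis : PySem.Set (List Int)) (L : List (List Int)),
    pvLoopA size obstacles f [] vis L = L := by
  intro f vis L; cases f <;> rfl

theorem pvLoopB_nil (size : Int) (obstacles : PySem.Set (List Int)) :
    ∀ (g : Nat) (vis : PySem.Set (List Int)) (par : PySem.Dict (List Int) (List Int))
      (last : List (List Int)) (depth : Int),
    pvLoopB size obstacles g [] vis par last depth = (par, last, depth) := by
  intro g vis par last depth; cases g <;> rfl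

-- main coupling of the two loops, level by level
theorem loop_couple (size : Int) (obstacles : PySem.Set (List Int)) :
    ∀ (g : Nat) (dep : Nat) (e₀ : List Int × List (List Int))
      (lvl : List (List Int × List (List Int))) (f : Nat)
      (vis : PySem.Set (List Int)) (par : PySem.Dict (List Int) (List Int))
      (L : List (List Int)),
    (∀ e ∈ e₀ :: lvl, GoodA vis par e) →
    (∀ e ∈ e₀ :: lvl, e.2.length = dep) →
    ((dep = 0 ∧ L = []) ∨ (1 ≤ dep ∧ L.length + 1 = dep)) →
    (e₀ :: lvl).length + gridUnvis size vis ≤ f →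
    1 + gridUnvis size vis ≤ g →
    (pvLoopB size obstacles g ((e₀ :: lvl).map Prod.fst) vis par ((e₀ :: lvl).map Prod.fst) (dep : Int)).2.2
        = ((pvLoopA size obstacles f (e₀ :: lvl) vis L).length : Int)
    ∧ recPath (pvLoopB size obstacles g ((e₀ :: lvl).map Prod.fst) vis par ((e₀ :: lvl).map Prod.fst) (dep : Int)).1
        (pvLoopA size obstacles f (e₀ :: lvl) vis L).length
        (PySem.List.pyGetD (pvLoopB size obstacles g ((e₀ :: lvl).map Prod.fst) vis par ((e₀ :: lvl).map Prod.fst) (dep : Int)).2.1 0 [])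
        = pvLoopA size obstacles f (e₀ :: lvl) vis L := by
  intro g
  induction g with
  | zero =>
    intro dep e₀ lvl f vis par L _ _ _ _ hg
    exact absurd hg (by omega)
  | succ g ih =>
    intro dep e₀ lvl f vis par L hgood hdep hL hf hg
    obtain ⟨pos, path⟩ := e₀
    obtain ⟨hrecE, hposE, hpathE⟩ := hgood (pos, path) List.mem_cons_self
    have hdpath : path.length = dep := hdep (pos, path) List.mem_cons_self
    simp only [List.length_cons] at hf
    -- A: one step on the head entry; f = 1 + (lvl.length + f')
    obtain ⟨f', hf'⟩ : ∃ f', f = (lvl.length + f') + 1 := ⟨f - lvl.length - 1, by omega⟩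
    subst hf'
    simp only [pvLoopA]
    have hLup : (if path.length > L.length then path else L) = path := by
      rcases hL with ⟨h0, rfl⟩ | ⟨h1, h2⟩
      · have hpl : path = [] := List.length_eq_zero_iff.mp (by omega)
        rw [if_neg (by simp [hpl])]
        exact hpl.symm
      · rw [if_pos (by omega)]
    rw [hLup]
    -- split off head's fold
    have hshift := foldA_shift size obstacles pos path
      (PySem.List.pyGetD pos 0 0) (PySem.List.pyGetD pos 1 0) pvDirs lvl [] vis
    obtain ⟨c1, c2, c3, c4, c5, c6, c7⟩ := fold_couple size obstacles pos path
      (PySem.List.pyGetD pos 0 0) (PySem.List.pyGetD pos 1 0) pvDirs [] vis par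
      (by simp) hposE hpathE hrecE
    set FA := List.foldl (pvStepA size obstacles pos path
      (PySem.List.pyGetD pos 0 0) (PySem.List.pyGetD pos 1 0)) ([], vis) pvDirs with hFA
    set FB := List.foldl (pvStepB size obstacles pos
      (PySem.List.pyGetD pos 0 0) (PySem.List.pyGetD pos 1 0)) (([] : List (List Int)), vis, par) pvDirs with hFB
    simp only [List.map_nil] at c1 c2 c3 c6
    have hqA : (List.foldl (pvStepA size obstacles pos path
        (PySem.List.pyGetD pos 0 0) (PySem.List.pyGetD pos 1 0)) (lvl, vis) pvDirs)
        = (lvl ++ FA.1, FA.2) := by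
      simpa using hshift
    rw [hqA]
    -- level lemma on the remaining entries
    have hglvl : ∀ e' ∈ lvl ++ FA.1, GoodA FA.2 FB.2.2 e' := by
      intro e' he'
      rcases List.mem_append.mp he' with h | h
      · obtain ⟨h1, h2, h3⟩ := hgood e' (List.mem_cons_of_mem _ h)
        exact ⟨by rw [c6 e'.2.length e'.1 h2 (fun z hz => h3 z (h1 ▸ hz))]; exact h1,
          c5 e'.1 h2, fun z hz => c5 z (h3 z hz)⟩
      · exact c3 e' h
    have hlenFA : ∀ e' ∈ FA.1, e'.2.length = dep + 1 := by
      intro e' he'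
      rcases c4 e' he' with h | h
      · simp at h
      · rw [h]; simp [hdpath]
    obtain ⟨qA', vis', par', d1, d2, d3, d4, d5, d6, d7⟩ :=
      level_couple size obstacles dep lvl FA.1 FA.2 FB.2.2 path f' hglvl
        (fun e' he' => hdep e' (List.mem_cons_of_mem _ he'))
        hlenFA (by omega)
    rw [d1]
    -- B: one level step
    simp only [List.map_cons, pvLoopB]
    have hnodeB : pvNodeB size obstacles (([] : List (List Int)), vis, par) pos
        = (FA.1.map Prod.fst, FA.2, FB.2.2) := by
      simp only [pvNodeB]
      rw [← hFB]
      exact Prod.ext c1 (Prod.ext c2 rfl)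
    have hfoldB : (pos :: lvl.map Prod.fst).foldl (pvNodeB size obstacles) ([], vis, par)
        = (qA'.map Prod.fst, vis', par') := by
      have : (pos :: lvl.map Prod.fst).foldl (pvNodeB size obstacles) ([], vis, par)
          = (lvl.map Prod.fst).foldl (pvNodeB size obstacles)
              (pvNodeB size obstacles ([], vis, par) pos) := by
        simp [List.foldl_cons]
      rw [this, hnodeB]
      simpa using d2
    rw [hfoldB]
    -- stability of the head path's reconstruction through this level
    have hrecPos : recPath par' dep pos = path := by
      have h1 : recPath FB.2.2 dep pos = recPath par dep pos := by
        rw [← hdpath]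
        exact c6 path.length pos hposE (fun z hz => hpathE z (hrecE ▸ hz))
      have h2 : recPath par' dep pos = recPath FB.2.2 dep pos := by
        rw [← hdpath] at h1 ⊢
        exact d6 path.length pos (c5 pos hposE)
          (fun z hz => c5 z (hpathE z (by rw [h1] at hz; exact hrecE ▸ hz)))
      rw [h2, h1, ← hdpath, hrecE]
    -- counting after the level
    have hcount : qA'.length + gridUnvis size vis' ≤ gridUnvis size vis := by
      have := c7
      simp at this
      omega
    cases hqA' : qA' with
    | nil =>
      -- next level empty: both loops terminate
      subst hqA'
      simp only [List.map_nil, List.isEmpty_nil, if_true]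
      rw [pvLoopB_nil, pvLoopA_nil]
      have hhead : PySem.List.pyGetD (pos :: lvl.map Prod.fst) 0 [] = pos := by
        simp [PySem.List.pyGetD, PySem.List.pyGet?, PySem.List.pyIdx?]
      refine ⟨by simp [hdpath], ?_⟩
      show recPath par' path.length (PySem.List.pyGetD (pos :: lvl.map Prod.fst) 0 []) = path
      rw [hhead, hdpath]
      exact hrecPos
    | cons e₁ rest =>
      subst hqA'
      rw [if_neg (by simp : ¬ ((e₁ :: rest).map Prod.fst).isEmpty = true)]
      have hrest := ih (dep + 1) e₁ rest f' vis' par' path d3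
        d4 (Or.inr ⟨by omega, by simp [hdpath]⟩)
        (by
          have h1 : (e₁ :: rest).length + gridUnvis size vis' ≤ gridUnvis size vis := hcount
          simp only [List.length_cons] at h1 ⊢
          omega)
        (by
          have h1 : (e₁ :: rest).length + gridUnvis size vis' ≤ gridUnvis size vis := hcount
          simp only [List.length_cons] at h1
          omega)
      have hcast : ((dep + 1 : Nat) : Int) = ((dep : Int) + 1) := by push_cast; ring
      rw [hcast] at hrest
      exact hrest

-- ===== VERDICT (by name: the statement is the Claim_ definition above) =====
theorem find_longest_path_bfs_spec : Claim_equal_find_longest_path_bfs := by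
  intro start size snake_body avoid_positions _ _
  unfold Spec_find_longest_path_bfs
  show find_longest_path_bfs start size snake_body avoid_positions
      = find_longest_path_bfs_alt start size snake_body avoid_positions
  simp only [find_longest_path_bfs, find_longest_path_bfs_alt]
  have hobs : (if PySem.Set.contains (PySem.Set.ofList (snake_body ++ avoid_positions)) start
      then PySem.Set.discard (PySem.Set.ofList (snake_body ++ avoid_positions)) start
      else PySem.Set.ofList (snake_body ++ avoid_positions))
      = PySem.Set.discard (PySem.Set.ofList (snake_body ++ avoid_positions)) start := by
    by_cases hc : PySem.Set.contains (PySem.Set.ofList (snake_body ++ avoid_positions)) start = true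
    · rw [if_pos hc]
    · rw [if_neg hc]
      exact (discard_of_not_mem (fun hm => hc ((PySem.Set.contains_iff _ _).mpr hm))).symm
  rw [hobs]
  have hN := gridUnvis_le size (PySem.Set.ofList [start])
  obtain ⟨h1, h2⟩ := loop_couple size
    (PySem.Set.discard (PySem.Set.ofList (snake_body ++ avoid_positions)) start)
    (size.toNat * size.toNat + 2) 0 (start, []) [] (size.toNat * size.toNat + 2)
    (PySem.Set.ofList [start]) PySem.Dict.empty []
    (by
      rintro e he
      have he' : e = (start, ([] : List (List Int))) := by simpa using he
      subst he'
      exact ⟨rfl, by rw [PySem.Set.mem_ofList]; exact List.mem_singleton_self _, by simp⟩)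
    (by intro e he; have he' : e = (start, ([] : List (List Int))) := by simpa using he
        subst he'; rfl)
    (Or.inl ⟨rfl, rfl⟩)
    (by simp; omega)
    (by omega)
  simp only [List.map_cons, List.map_nil, Nat.cast_zero] at h1 h2
  by_cases hb : PySem.Set.contains (PySem.Set.ofList (snake_body ++ avoid_positions)) start = true
  · rw [if_pos hb, if_pos (by rw [hb]; rfl)]
  · rw [Bool.not_eq_true] at hb
    rw [if_neg (by rw [hb]; simp), hb, Bool.false_or]
    set LA := pvLoopA size
      (PySem.Set.discard (PySem.Set.ofList (snake_body ++ avoid_positions)) start)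
      (size.toNat * size.toNat + 2) [(start, [])] (PySem.Set.ofList [start]) [] with hLA
    by_cases hL : LA = []
    · rw [if_pos hL]
      rw [hL] at h1
      simp only [List.length_nil, Nat.cast_zero] at h1
      rw [if_pos (by rw [h1]; rfl)]
    · rw [if_neg hL]
      have hlen : LA.length ≠ 0 := fun h => hL (List.length_eq_zero_iff.mp h)
      rw [if_neg (by
        rw [h1]
        simp only [beq_iff_eq]
        exact_mod_cast hlen)]
      rw [recLoopB_eq_recPath]
      rw [h1, Int.toNat_natCast, h2]
      simp
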